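-- pv_equiv track=rewrite | github.com/hnl-ai/hpdstats | scrape/utils/ocr.py | correct_ethnicities
-- ===== SOURCE A (Python) =====
-- def correct_ethnicities(ethnicities):
--     """Corrects a list of OCR misread ethnicities into their proper category."""
--     ethnicities = list(filter(None, ethnicities))
--     ethnicities = [x.strip() for x in ethnicities]
--     corrections = {
--         "Filipino": ["Filipi", "Filipir", "Filig", "Filip", "Filipit"],
--         "Hawaiian": ["Hawe", "Haw:", "Hawai", "Hawaiia", "Hawaiie", "Hav"],
--         "Samoan": ["Sam", "Samc", "Samo:", "San", "Sarn",
--             "Sar", "Samoar", "Samoi", "Sarr"],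
--         "Hispanic": ["Hispani", "Hispani:", "Hispanir", "Hispaniv"],
--         "Other": ["Othe", "Othe:", "Other Pac. Isl", "Othe!",
--             "Other Pac. Isl:", "Other P", "Other A", "Other Asian"],
--         "Unknown": ["H", "C", "Unkr"],
--         "Indian": ["India", "Indiai"],
--         "Japanese": ["Jap", "Jap:", "Jap<", "Japa", "Japane:", "Japan", "Japai", "Japanes"],
--         "Native American": ["Native Americ", "Native", "Nativ", "Native /"],
--         "Chinese": ["Chin"],
--         "Tongan": ["Ton:", "Ton", "Tong"],
--         "Micronesian": ["Mic", "Micr", "Micrc", "Microne", "Micror"],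
--         "Laotian": ["Laotia"],
--         "Middle Eastern": ["Middle Easter", "Middle Easter:"],
--         "Black": ["Blac"],
--         "Korean": ["Kor", "Kore", "Kore:"],
--         "White": ["Whi", "Whi!", "Whit", "Whit:"]
--     }
--     corrected_ethnicities = []
--
--     for ethnicity in ethnicities:
--         inserted = False
--         for correction, wrongs in corrections.items():
--             if ethnicity in wrongs:
--                 corrected_ethnicities.append(correction)
--                 inserted = True
--         if not inserted:
--             corrected_ethnicities.append(ethnicity)
--
--     return corrected_ethnicities
-- ===== SOURCE B (Python) =====
-- # Flat reverse-lookup table: each OCR-misread string mapped directly to its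
-- # canonical category (the inverse of A's category -> wrongs-list table; the
-- # wrongs-lists are disjoint, so the inversion is well defined).
-- _REVERSE = {
--     'Filipi': 'Filipino',
--     'Filipir': 'Filipino',
--     'Filig': 'Filipino',
--     'Filip': 'Filipino',
--     'Filipit': 'Filipino',
--     'Hawe': 'Hawaiian',
--     'Haw:': 'Hawaiian',
--     'Hawai': 'Hawaiian',
--     'Hawaiia': 'Hawaiian',
--     'Hawaiie': 'Hawaiian',
--     'Hav': 'Hawaiian',
--     'Sam': 'Samoan',
--     'Samc': 'Samoan',
--     'Samo:': 'Samoan',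
--     'San': 'Samoan',
--     'Sarn': 'Samoan',
--     'Sar': 'Samoan',
--     'Samoar': 'Samoan',
--     'Samoi': 'Samoan',
--     'Sarr': 'Samoan',
--     'Hispani': 'Hispanic',
--     'Hispani:': 'Hispanic',
--     'Hispanir': 'Hispanic',
--     'Hispaniv': 'Hispanic',
--     'Othe': 'Other',
--     'Othe:': 'Other',
--     'Other Pac. Isl': 'Other',
--     'Othe!': 'Other',
--     'Other Pac. Isl:': 'Other',
--     'Other P': 'Other',
--     'Other A': 'Other',
--     'Other Asian': 'Other',
--     'H': 'Unknown',
--     'C': 'Unknown',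
--     'Unkr': 'Unknown',
--     'India': 'Indian',
--     'Indiai': 'Indian',
--     'Jap': 'Japanese',
--     'Jap:': 'Japanese',
--     'Jap<': 'Japanese',
--     'Japa': 'Japanese',
--     'Japane:': 'Japanese',
--     'Japan': 'Japanese',
--     'Japai': 'Japanese',
--     'Japanes': 'Japanese',
--     'Native Americ': 'Native American',
--     'Native': 'Native American',
--     'Nativ': 'Native American',
--     'Native /': 'Native American',
--     'Chin': 'Chinese',
--     'Ton:': 'Tongan',
--     'Ton': 'Tongan',
--     'Tong': 'Tongan',
--     'Mic': 'Micronesian',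
--     'Micr': 'Micronesian',
--     'Micrc': 'Micronesian',
--     'Microne': 'Micronesian',
--     'Micror': 'Micronesian',
--     'Laotia': 'Laotian',
--     'Middle Easter': 'Middle Eastern',
--     'Middle Easter:': 'Middle Eastern',
--     'Blac': 'Black',
--     'Kor': 'Korean',
--     'Kore': 'Korean',
--     'Kore:': 'Korean',
--     'Whi': 'White',
--     'Whi!': 'White',
--     'Whit': 'White',
--     'Whit:': 'White',
-- }
--
--
-- def correct_ethnicities(ethnicities):
--     """Corrects a list of OCR misread ethnicities into their proper category."""
--     out = []
--     for e in ethnicities: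
--         if e:
--             s = e.strip()
--             out.append(_REVERSE.get(s, s))
--     return out
-- ===== Notes on version B (the rewrite author's own statement) =====
-- stated objective: faster
-- what changed: Replaces A's three staged passes with nested per-element scan over the 17 correction lists by one single-pass loop that filters, strips and maps each element through a precomputed flat reverse-lookup dict (wrong string -> category).
import Mathlib
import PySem

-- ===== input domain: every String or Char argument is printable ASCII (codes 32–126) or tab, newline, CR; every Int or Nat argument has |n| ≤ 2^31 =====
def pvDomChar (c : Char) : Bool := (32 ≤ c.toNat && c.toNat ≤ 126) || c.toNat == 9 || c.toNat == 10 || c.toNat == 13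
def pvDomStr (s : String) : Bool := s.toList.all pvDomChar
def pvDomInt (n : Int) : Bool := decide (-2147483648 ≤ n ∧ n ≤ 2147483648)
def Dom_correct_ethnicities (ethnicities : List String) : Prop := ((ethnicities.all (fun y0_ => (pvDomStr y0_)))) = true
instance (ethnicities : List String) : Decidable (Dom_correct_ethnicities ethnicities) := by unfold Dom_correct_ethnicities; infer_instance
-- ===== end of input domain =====

-- B replaces A's staged passes and per-element scan over the 17 correction lists by
-- a single pass through a precomputed flat reverse-lookup table (measured faster in a timing run).

-- ===== PORT A =====
-- the corrections table, A's dict literal (insertion order)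
def pvCorrections : List (String × List String) :=
  [("Filipino", ["Filipi", "Filipir", "Filig", "Filip", "Filipit"]),
   ("Hawaiian", ["Hawe", "Haw:", "Hawai", "Hawaiia", "Hawaiie", "Hav"]),
   ("Samoan", ["Sam", "Samc", "Samo:", "San", "Sarn", "Sar", "Samoar", "Samoi", "Sarr"]),
   ("Hispanic", ["Hispani", "Hispani:", "Hispanir", "Hispaniv"]),
   ("Other", ["Othe", "Othe:", "Other Pac. Isl", "Othe!", "Other Pac. Isl:", "Other P", "Other A", "Other Asian"]),
   ("Unknown", ["H", "C", "Unkr"]),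
   ("Indian", ["India", "Indiai"]),
   ("Japanese", ["Jap", "Jap:", "Jap<", "Japa", "Japane:", "Japan", "Japai", "Japanes"]),
   ("Native American", ["Native Americ", "Native", "Nativ", "Native /"]),
   ("Chinese", ["Chin"]),
   ("Tongan", ["Ton:", "Ton", "Tong"]),
   ("Micronesian", ["Mic", "Micr", "Micrc", "Microne", "Micror"]),
   ("Laotian", ["Laotia"]),
   ("Middle Eastern", ["Middle Easter", "Middle Easter:"]),
   ("Black", ["Blac"]),
   ("Korean", ["Kor", "Kore", "Kore:"]),
   ("White", ["Whi", "Whi!", "Whit", "Whit:"])]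

def correct_ethnicities (ethnicities : List String) : List String :=
  -- ethnicities = list(filter(None, ethnicities))  (a str is truthy iff nonempty)
  let ethnicities := ethnicities.filter (fun x => x != "")
  -- ethnicities = [x.strip() for x in ethnicities]
  let ethnicities := ethnicities.map (fun x => PySem.Str.strip x)
  -- for ethnicity in ...: inserted = False; for correction, wrongs in corrections.items(): ...
  ethnicities.foldl (fun corrected ethnicity =>
    let p := pvCorrections.foldl
      (fun (p : List String × Bool) cw =>
        if cw.2.contains ethnicity then (p.1 ++ [cw.1], true) else p)
      (corrected, false)
    if p.2 then p.1 else p.1 ++ [ethnicity]) []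

-- ===== PORT B =====
-- _REVERSE: B's flat module-level dict literal (wrong string -> category)
def pvReverse : List (String × String) :=
  [("Filipi", "Filipino"),
   ("Filipir", "Filipino"),
   ("Filig", "Filipino"),
   ("Filip", "Filipino"),
   ("Filipit", "Filipino"),
   ("Hawe", "Hawaiian"),
   ("Haw:", "Hawaiian"),
   ("Hawai", "Hawaiian"),
   ("Hawaiia", "Hawaiian"),
   ("Hawaiie", "Hawaiian"),
   ("Hav", "Hawaiian"),
   ("Sam", "Samoan"),
   ("Samc", "Samoan"),
   ("Samo:", "Samoan"),
   ("San", "Samoan"),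
   ("Sarn", "Samoan"),
   ("Sar", "Samoan"),
   ("Samoar", "Samoan"),
   ("Samoi", "Samoan"),
   ("Sarr", "Samoan"),
   ("Hispani", "Hispanic"),
   ("Hispani:", "Hispanic"),
   ("Hispanir", "Hispanic"),
   ("Hispaniv", "Hispanic"),
   ("Othe", "Other"),
   ("Othe:", "Other"),
   ("Other Pac. Isl", "Other"),
   ("Othe!", "Other"),
   ("Other Pac. Isl:", "Other"),
   ("Other P", "Other"),
   ("Other A", "Other"),
   ("Other Asian", "Other"),
   ("H", "Unknown"),
   ("C", "Unknown"),
   ("Unkr", "Unknown"),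
   ("India", "Indian"),
   ("Indiai", "Indian"),
   ("Jap", "Japanese"),
   ("Jap:", "Japanese"),
   ("Jap<", "Japanese"),
   ("Japa", "Japanese"),
   ("Japane:", "Japanese"),
   ("Japan", "Japanese"),
   ("Japai", "Japanese"),
   ("Japanes", "Japanese"),
   ("Native Americ", "Native American"),
   ("Native", "Native American"),
   ("Nativ", "Native American"),
   ("Native /", "Native American"),
   ("Chin", "Chinese"),
   ("Ton:", "Tongan"),
   ("Ton", "Tongan"),
   ("Tong", "Tongan"),
   ("Mic", "Micronesian"),
   ("Micr", "Micronesian"),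
   ("Micrc", "Micronesian"),
   ("Microne", "Micronesian"),
   ("Micror", "Micronesian"),
   ("Laotia", "Laotian"),
   ("Middle Easter", "Middle Eastern"),
   ("Middle Easter:", "Middle Eastern"),
   ("Blac", "Black"),
   ("Kor", "Korean"),
   ("Kore", "Korean"),
   ("Kore:", "Korean"),
   ("Whi", "White"),
   ("Whi!", "White"),
   ("Whit", "White"),
   ("Whit:", "White")]

-- _REVERSE.get(s, s)
def pvReverseGet (s : String) : String :=
  match pvReverse.find? (fun p => p.1 == s) with
  | some p => p.2
  | none => s

def correct_ethnicities_alt (ethnicities : List String) : List String :=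
  -- out = []; for e in ethnicities: if e: out.append(_REVERSE.get(e.strip(), e.strip()))
  ethnicities.foldl (fun out e =>
    if e != "" then out ++ [pvReverseGet (PySem.Str.strip e)] else out) []

-- ===== PRECONDITION & SPEC =====
def Spec_correct_ethnicities (ethnicities : List String) (out : List String) : Prop := out = correct_ethnicities_alt ethnicities
instance (ethnicities : List String) (out : List String) : Decidable (Spec_correct_ethnicities ethnicities out) := by unfold Spec_correct_ethnicities; infer_instance

-- ===== CLAIM (what is proved, stated in full; the proofs are below) =====
def Claim_equal_correct_ethnicities : Prop := ∀ (ethnicities : List String), Dom_correct_ethnicities ethnicities → Spec_correct_ethnicities ethnicities (correct_ethnicities ethnicities)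

-- ===== LEMMAS AND PROOFS =====

-- the flattened reverse table, in insertion order
def pvFlat (t : List (String × List String)) : List (String × String) :=
  t.flatMap (fun cw => cw.2.map (fun w => (w, cw.1)))

-- first-match association-list lookup with default e
def pvLook (l : List (String × String)) (e : String) : String :=
  ((l.find? (fun p => p.1 == e)).map (fun p => p.2)).getD e

theorem pvFind_beq {ws : List String} {e : String} (h : e ∈ ws) :
    ws.find? (fun w => w == e) = some e := by
  induction ws with
  | nil => cases h
  | cons a t ih =>
    by_cases ha : a = e
    · simp [List.find?, ha]
    · have ht : e ∈ t := by
        rcases List.mem_cons.mp h with heq | ht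
        · exact absurd heq.symm ha
        · exact ht
      have hb : (a == e) = false := beq_eq_false_iff_ne.mpr ha
      simp [List.find?, hb, ih ht]

theorem pvAny_flat (t : List (String × List String)) (e : String) :
    t.any (fun cw => cw.2.contains e) = true ↔ e ∈ (pvFlat t).map (fun p => p.1) := by
  simp [pvFlat, List.any_eq_true, List.mem_flatMap, List.mem_map]

theorem pvG2 (t : List (String × List String)) (e : String)
    (hnd : ((pvFlat t).map (fun p => p.1)).Nodup) :
    (if t.any (fun cw => cw.2.contains e) then
       (t.filter (fun cw => cw.2.contains e)).map (fun p => p.1)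
     else [e]) = [pvLook (pvFlat t) e] := by
  induction t with
  | nil => simp [pvLook, pvFlat]
  | cons cw rest ih =>
    obtain ⟨c, ws⟩ := cw
    have hflat : pvFlat ((c, ws) :: rest) = ws.map (fun w => (w, c)) ++ pvFlat rest := by
      simp [pvFlat]
    rw [hflat] at hnd ⊢
    rw [List.map_append, List.map_map] at hnd
    have hkeys : ws.map ((fun p => p.1) ∘ (fun w => ((w : String), c))) = ws := by
      simp [Function.comp_def]
    rw [hkeys] at hnd
    by_cases hc : e ∈ ws
    · have hrest : e ∉ (pvFlat rest).map (fun p => p.1) :=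
        fun hmem => List.disjoint_of_nodup_append hnd hc hmem
      have hany : rest.any (fun cw => cw.2.contains e) = false := by
        rw [Bool.eq_false_iff]
        intro hh
        exact hrest ((pvAny_flat rest e).mp hh)
      have hfil : rest.filter (fun cw => cw.2.contains e) = [] := by
        rw [List.filter_eq_nil_iff]
        intro x hx hcon
        have hh : rest.any (fun cw => cw.2.contains e) = true :=
          List.any_eq_true.mpr ⟨x, hx, hcon⟩
        rw [hany] at hh; cases hh
      have hfind : (ws.map (fun w => (w, c))).find? (fun p => p.1 == e) = some (e, c) := by
        rw [List.find?_map]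
        have hf : (ws.find? (fun w => w == e)) = some e := pvFind_beq hc
        simp [Function.comp_def, hf]
      have hcon : ws.contains e = true := by simpa using hc
      rw [List.any_cons, hcon, Bool.true_or, if_pos rfl]
      rw [List.filter_cons, pvLook, List.find?_append, hfind]
      simp only [hcon, hfil]
      rfl
    · have hcon : ws.contains e = false := by simpa using hc
      have hfind : (ws.map (fun w => (w, c))).find? (fun p => p.1 == e) = none := by
        rw [List.find?_map]
        have hf : (ws.find? (fun w => w == e)) = none := by
          rw [List.find?_eq_none]
          intro w hw
          simp only [beq_iff_eq]
          rintro rfl; exact hc hw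
        simp [Function.comp_def, hf]
      have hnd' : ((pvFlat rest).map (fun p => p.1)).Nodup := (List.nodup_append.mp hnd).2.1
      rw [List.any_cons, hcon, Bool.false_or]
      rw [List.filter_cons, hcon]
      rw [pvLook, List.find?_append, hfind]
      simp only [Bool.false_eq_true, if_false]
      rw [ih hnd']
      rfl

-- B's flat table is exactly A's table flattened
set_option maxRecDepth 40000 in
theorem pvReverse_eq_flat : pvReverse = pvFlat pvCorrections := by decide

-- the wrongs-lists of the table are disjoint and duplicate-free
set_option maxRecDepth 40000 in
theorem pvNodup : ((pvFlat pvCorrections).map (fun p => p.1)).Nodup := by decide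

theorem pvReverseGet_eq_look (s : String) :
    pvReverseGet s = pvLook (pvFlat pvCorrections) s := by
  unfold pvReverseGet pvLook
  rw [pvReverse_eq_flat]
  cases (pvFlat pvCorrections).find? (fun p => p.1 == s) <;> rfl

theorem pvStepA (corrected : List String) (e : String) :
    (let p := pvCorrections.foldl
        (fun (p : List String × Bool) cw =>
          if cw.2.contains e then (p.1 ++ [cw.1], true) else p)
        (corrected, false)
     if p.2 then p.1 else p.1 ++ [e]) = corrected ++ [pvLook (pvFlat pvCorrections) e] := by
  have hsplit : (fun (p : List String × Bool) (cw : String × List String) =>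
      if cw.2.contains e then (p.1 ++ [cw.1], true) else p)
      = (fun (p : List String × Bool) (cw : String × List String) =>
          ((if cw.2.contains e then p.1 ++ [cw.1] else p.1),
           (if cw.2.contains e then true else p.2))) := by
    funext p cw
    by_cases h : cw.2.contains e = true
    · rw [if_pos h, if_pos h, if_pos h]
    · rw [if_neg h, if_neg h, if_neg h]
  rw [hsplit]
  rw [PySem.List.foldl_prod_mk
        (f := fun (a : List String) (cw : String × List String) => if cw.2.contains e then a ++ [cw.1] else a)
        (g := fun (b : Bool) (cw : String × List String) => if cw.2.contains e then true else b)]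
  rw [PySem.List.foldl_append_if (p := fun (cw : String × List String) => cw.2.contains e) (f := fun cw => cw.1)]
  rw [PySem.List.foldl_if_true_eq]
  have hG := pvG2 pvCorrections e pvNodup
  by_cases h : pvCorrections.any (fun cw => cw.2.contains e) = true
  · rw [if_pos h] at hG
    simp only [h, Bool.false_or, hG]
    simp
  · have hb := Bool.not_eq_true _ |>.mp h
    rw [hb, if_neg (by simp)] at hG
    have hfil : pvCorrections.filter (fun cw => cw.2.contains e) = [] := by
      rw [List.filter_eq_nil_iff]
      intro x hx hcon
      exact h (List.any_eq_true.mpr ⟨x, hx, hcon⟩)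
    simp only [hb, Bool.false_or, Bool.false_eq_true, if_false, hfil, ← hG]
    simp

theorem pvFoldA (cleaned : List String) (acc : List String) :
    cleaned.foldl (fun corrected ethnicity =>
      let p := pvCorrections.foldl
        (fun (p : List String × Bool) cw =>
          if cw.2.contains ethnicity then (p.1 ++ [cw.1], true) else p)
        (corrected, false)
      if p.2 then p.1 else p.1 ++ [ethnicity]) acc
    = acc ++ cleaned.map (fun e => pvLook (pvFlat pvCorrections) e) := by
  induction cleaned generalizing acc with
  | nil => simp
  | cons x xs ih =>
    simp only [List.foldl_cons, List.map_cons]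
    rw [pvStepA, ih, List.append_assoc, List.singleton_append]

theorem pvFoldB (l : List String) (acc : List String) :
    l.foldl (fun out e =>
      if e != "" then out ++ [pvReverseGet (PySem.Str.strip e)] else out) acc
    = acc ++ (l.filter (fun x => x != "")).map (fun e => pvReverseGet (PySem.Str.strip e)) := by
  induction l generalizing acc with
  | nil => simp
  | cons x xs ih =>
    simp only [List.foldl_cons, List.filter_cons]
    by_cases hx : (x != "") = true
    · simp only [hx, if_true, ih, List.map_cons, List.append_assoc, List.singleton_append]
    · have hb := Bool.not_eq_true _ |>.mp hx
      simp only [hb, Bool.false_eq_true, if_false, ih]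

-- ===== VERDICT (by name: the statement is the Claim_ definition above) =====
theorem correct_ethnicities_spec : Claim_equal_correct_ethnicities := by
  intro ethnicities _
  unfold Spec_correct_ethnicities
  simp only [correct_ethnicities, correct_ethnicities_alt]
  rw [pvFoldA, pvFoldB, List.map_map]
  simp [Function.comp_def, pvReverseGet_eq_look]
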